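-- pv_equiv track=rewrite | github.com/tarmoj/emic | repertoire-search/insert_batch_results_to_database.py | _repair_json_text
-- ===== SOURCE A (Python) =====
-- def _repair_json_text(text):
--     repaired = []
--     in_string = False
--     escaped = False
--     length = len(text)
--
--     for index, char in enumerate(text):
--         if in_string:
--             if escaped:
--                 repaired.append(char)
--                 escaped = False
--                 continue
--
--             if char == "\\":
--                 repaired.append(char)
--                 escaped = True
--                 continue
--
--             if char == "\n":
--                 repaired.append("\\n")
--                 continue
--
--             if char == '"':
--                 lookahead = index + 1
--                 while lookahead < length and text[lookahead] in " \t\r\n":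
--                     lookahead += 1
--                 next_char = text[lookahead] if lookahead < length else ""
--
--                 if next_char in {",", "}", "]", ":", ""}:
--                     repaired.append('"')
--                     in_string = False
--                 else:
--                     repaired.append('\\"')
--                 continue
--
--             repaired.append(char)
--             continue
--
--         repaired.append(char)
--         if char == '"':
--             in_string = True
--
--     return "".join(repaired)
-- ===== SOURCE B (Python) =====
-- def _repair_json_text(text):
--     n = len(text)
--     # backward pass: closer[i] is True iff the first non-whitespace character at
--     # position >= i is one of , } ] : or the text ends first
--     closer = [True] * (n + 1)
--     for k in range(n - 1, -1, -1):
--         c = text[k]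
--         closer[k] = closer[k + 1] if c in " \t\r\n" else c in ",}]:"
--     out = []
--     i = 0
--     while i < n:
--         c = text[i]
--         out.append(c)
--         i += 1
--         if c == '"':
--             while i < n:
--                 ch = text[i]
--                 if ch == '\\':
--                     out.append(ch)
--                     i += 1
--                     if i < n:
--                         out.append(text[i])
--                         i += 1
--                 elif ch == '\n':
--                     out.append('\\n')
--                     i += 1
--                 elif ch == '"':
--                     i += 1
--                     if closer[i]:
--                         out.append('"')
--                         break
--                     out.append('\\"')
--                 else:
--                     out.append(ch)
--                     i += 1
--     return ''.join(out)
-- ===== Notes on version B (the rewrite author's own statement) =====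
-- stated objective: alternative
-- what changed: B first builds, in one backward pass, a suffix table answering 'is the first non-whitespace character at or after position i a closer or end-of-text?', so A's inner whitespace-lookahead scan disappears, and then emits the output with index-driven nested while loops (outer copies plain text, inner scans each string body consuming backslash escapes two characters at a time) instead of A's flat loop with in_string/escaped booleans.
import Mathlib
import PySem

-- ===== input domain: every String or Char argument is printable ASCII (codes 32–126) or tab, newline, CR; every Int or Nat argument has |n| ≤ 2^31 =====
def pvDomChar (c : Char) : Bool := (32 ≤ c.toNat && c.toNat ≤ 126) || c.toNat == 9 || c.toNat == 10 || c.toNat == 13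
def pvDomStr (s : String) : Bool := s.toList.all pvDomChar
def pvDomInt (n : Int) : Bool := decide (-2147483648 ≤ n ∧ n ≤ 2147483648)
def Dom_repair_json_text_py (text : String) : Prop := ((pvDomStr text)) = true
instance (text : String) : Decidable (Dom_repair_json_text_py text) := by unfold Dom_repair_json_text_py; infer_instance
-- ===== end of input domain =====

-- B precomputes a backward suffix table of the quote-lookahead answer ("is the next
-- non-whitespace char a closer?"), removing A's inner whitespace scan, and replaces the
-- in_string/escaped flags with index-driven nested loops (objective: alternative).


-- ===== PORT A =====
-- A's lookahead: `while lookahead < length and text[lookahead] in " \t\r\n": lookahead += 1`.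
-- `fuel` only guards termination (j strictly increases and stays ≤ text.length, so
-- `text.length` fuel is always enough); it never changes the computed value.
def pvSkipWs (text : List Char) : Nat → Nat → Nat
  | 0, j => j
  | fuel + 1, j =>
    if h : j < text.length then
      if text[j] = ' ' ∨ text[j] = '\t' ∨ text[j] = '\r' ∨ text[j] = '\n' then
        pvSkipWs text fuel (j + 1)
      else j
    else j

-- `next_char = text[j] if j < length else ""` followed by `next_char in {",", "}", "]", ":", ""}`
def pvCloserAt (text : List Char) (j : Nat) : Bool :=
  match text[j]? with
  | none => true
  | some c => c = ',' ∨ c = '}' ∨ c = ']' ∨ c = ':'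

-- A's `for index, char in enumerate(text)` with the two state booleans; `l` is the
-- remaining suffix of `text` and `i` the current index (the enumerate counter).
def pvALoop (text : List Char) (i : Nat) (l : List Char) (inStr esc : Bool) : List Char :=
  match l with
  | [] => []
  | c :: rest =>
    if inStr then
      if esc then c :: pvALoop text (i + 1) rest true false
      else if c = '\\' then c :: pvALoop text (i + 1) rest true true
      else if c = '\n' then '\\' :: 'n' :: pvALoop text (i + 1) rest true false
      else if c = '"' then
        if pvCloserAt text (pvSkipWs text text.length (i + 1)) then
          '"' :: pvALoop text (i + 1) rest false false
        else '\\' :: '"' :: pvALoop text (i + 1) rest true false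
      else c :: pvALoop text (i + 1) rest true false
    else c :: pvALoop text (i + 1) rest (c = '"') false

def repair_json_text_py (text : String) : String :=
  String.ofList (pvALoop text.toList 0 text.toList false false)

-- ===== PORT B =====
-- B's backward pass `for k in range(n-1,-1,-1): closer[k] = closer[k+1] if ws else c in ",}]:"`;
-- building the list head-first from the front of the text is the same right-to-left
-- recurrence (closer[k] from closer[k+1]); the trailing [true] is the untouched closer[n].
def pvMkCloser : List Char → List Bool
  | [] => [true]
  | c :: rest =>
    let r := pvMkCloser rest
    (if c = ' ' ∨ c = '\t' ∨ c = '\r' ∨ c = '\n' then r.headD true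
     else decide (c = ',' ∨ c = '}' ∨ c = ']' ∨ c = ':')) :: r

-- B's inner while loop over a string body: returns the characters it emits and the
-- index at which it leaves the loop (by `break` on a closing '"' or by `i < n`
-- failing). `fuel` only guards termination: `i` strictly increases each step.
def pvBInner (text : List Char) (closer : List Bool) : Nat → Nat → List Char × Nat
  | 0, i => ([], i)
  | fuel + 1, i =>
    if h : i < text.length then
      let ch := text[i]
      if ch = '\\' then
        if h2 : i + 1 < text.length then
          let (r, j) := pvBInner text closer fuel (i + 2); (ch :: text[i + 1] :: r, j)
        else
          let (r, j) := pvBInner text closer fuel (i + 1); (ch :: r, j)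
      else if ch = '\n' then
        let (r, j) := pvBInner text closer fuel (i + 1); ('\\' :: 'n' :: r, j)
      else if ch = '"' then
        if closer.getD (i + 1) true then (['"'], i + 1)
        else let (r, j) := pvBInner text closer fuel (i + 1); ('\\' :: '"' :: r, j)
      else
        let (r, j) := pvBInner text closer fuel (i + 1); (ch :: r, j)
    else ([], i)

-- B's outer while loop: copy one character; after copying '"' run the inner scan and
-- resume at the index where it stopped.
def pvBOuter (text : List Char) (closer : List Bool) : Nat → Nat → List Char
  | 0, _ => []
  | fuel + 1, i =>
    if h : i < text.length then
      let c := text[i]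
      if c = '"' then
        let (r, j) := pvBInner text closer text.length (i + 1)
        c :: (r ++ pvBOuter text closer fuel j)
      else c :: pvBOuter text closer fuel (i + 1)
    else []

def repair_json_text_py_alt (text : String) : String :=
  String.ofList (pvBOuter text.toList (pvMkCloser text.toList) text.toList.length 0)

-- ===== PRECONDITION & SPEC =====
def Spec_repair_json_text_py (text : String) (out : String) : Prop := out = repair_json_text_py_alt text
instance (text : String) (out : String) : Decidable (Spec_repair_json_text_py text out) := by unfold Spec_repair_json_text_py; infer_instance

-- ===== CLAIM (what is proved, stated in full; the proofs are below) =====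
def Claim_equal_repair_json_text_py : Prop := ∀ (text : String), Dom_repair_json_text_py text → Spec_repair_json_text_py text (repair_json_text_py text)

-- ===== LEMMAS AND PROOFS =====

lemma pvMkCloser_ne_nil (l : List Char) : pvMkCloser l ≠ [] := by
  cases l <;> simp [pvMkCloser]

lemma pvMkCloser_getD_step (text : List Char) :
    ∀ i, (h : i < text.length) →
      (pvMkCloser text).getD i true =
        if text[i] = ' ' ∨ text[i] = '\t' ∨ text[i] = '\r' ∨ text[i] = '\n' then
          (pvMkCloser text).getD (i + 1) true
        else decide (text[i] = ',' ∨ text[i] = '}' ∨ text[i] = ']' ∨ text[i] = ':') := by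
  induction text with
  | nil => intro i h; simp at h
  | cons c rest IH =>
    intro i h
    cases i with
    | zero =>
      have hne := pvMkCloser_ne_nil rest
      cases hr : pvMkCloser rest with
      | nil => exact absurd hr hne
      | cons b bs => simp [pvMkCloser, hr]
    | succ j =>
      have hj : j < rest.length := by simpa using h
      have := IH j hj
      simpa [pvMkCloser] using this

lemma pvMkCloser_getD_ge (text : List Char) :
    ∀ i, text.length ≤ i → (pvMkCloser text).getD i true = true := by
  induction text with
  | nil =>
    intro i _
    cases i with
    | zero => simp [pvMkCloser]
    | succ j => simp [pvMkCloser]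
  | cons c rest IH =>
    intro i h
    cases i with
    | zero => simp at h
    | succ j =>
      have hj : rest.length ≤ j := by simpa using h
      simpa [pvMkCloser] using IH j hj

lemma pvCloserAt_ge (text : List Char) (j : Nat) (h : text.length ≤ j) :
    pvCloserAt text j = true := by
  have : text[j]? = none := by rw [List.getElem?_eq_none_iff]; omega
  simp [pvCloserAt, this]


-- the precomputed table answers A's lookahead question
lemma pvTableEq (text : List Char) :
    ∀ fuel i, text.length ≤ i + fuel →
      pvCloserAt text (pvSkipWs text fuel i) = (pvMkCloser text).getD i true := by
  intro fuel
  induction fuel with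
  | zero =>
    intro i h
    rw [pvSkipWs, pvCloserAt_ge text i (by omega), pvMkCloser_getD_ge text i (by omega)]
  | succ fuel IH =>
    intro i h
    by_cases hi : i < text.length
    · by_cases hw : text[i] = ' ' ∨ text[i] = '\t' ∨ text[i] = '\r' ∨ text[i] = '\n'
      · rw [pvSkipWs]
        simp only [dif_pos hi, if_pos hw]
        rw [IH (i + 1) (by omega), pvMkCloser_getD_step text i hi, if_pos hw]
      · rw [pvSkipWs]
        simp only [dif_pos hi, if_neg hw]
        rw [pvMkCloser_getD_step text i hi, if_neg hw]
        have hg : text[i]? = some text[i] := List.getElem?_eq_getElem hi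
        simp [pvCloserAt, hg]
    · rw [pvSkipWs]
      simp only [dif_neg hi]
      rw [pvCloserAt_ge text i (by omega), pvMkCloser_getD_ge text i (by omega)]

-- the inner loop emits exactly what A emits in in_string mode, and hands control
-- back to the outer loop at an index ≥ its start
lemma pvInner (text : List Char) : ∀ fuel i, text.length ≤ i + fuel →
    i ≤ (pvBInner text (pvMkCloser text) fuel i).2 ∧
    pvALoop text i (text.drop i) true false =
      (pvBInner text (pvMkCloser text) fuel i).1 ++
        pvALoop text (pvBInner text (pvMkCloser text) fuel i).2
          (text.drop (pvBInner text (pvMkCloser text) fuel i).2) false false := by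
  intro fuel
  induction fuel with
  | zero =>
    intro i hf
    have hdrop : text.drop i = [] := List.drop_eq_nil_iff.mpr (by omega)
    simp [pvBInner, hdrop, pvALoop]
  | succ fuel IH =>
    intro i hf
    by_cases hi : i < text.length
    · have hdrop : text.drop i = text[i] :: text.drop (i + 1) := List.drop_eq_getElem_cons hi
      have htbl := pvTableEq text text.length (i + 1) (by omega)
      by_cases hb : text[i] = '\\'
      · by_cases hi2 : i + 1 < text.length
        · have hdrop2 : text.drop (i + 1) = text[i + 1] :: text.drop (i + 2) :=
            List.drop_eq_getElem_cons hi2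
          obtain ⟨ih1, ih2⟩ := IH (i + 2) (by omega)
          rcases hrj : pvBInner text (pvMkCloser text) fuel (i + 2) with ⟨r, j⟩
          rw [hrj] at ih1 ih2
          rw [pvBInner]
          simp only [dif_pos hi, dif_pos hi2, if_pos hb, hrj]
          refine ⟨by simpa using by omega, ?_⟩
          rw [hdrop]
          rw [pvALoop]
          simp only [Bool.false_eq_true, if_false, if_pos hb]
          rw [hdrop2, pvALoop]
          simp only []
          simpa using ih2
        · have hdrop2 : text.drop (i + 1) = [] := List.drop_eq_nil_iff.mpr (by omega)
          obtain ⟨ih1, ih2⟩ := IH (i + 1) (by omega)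
          rcases hrj : pvBInner text (pvMkCloser text) fuel (i + 1) with ⟨r, j⟩
          rw [hrj] at ih1 ih2
          rw [pvBInner]
          simp only [dif_pos hi, dif_neg hi2, if_pos hb, hrj]
          refine ⟨by simpa using by omega, ?_⟩
          rw [hdrop, pvALoop]
          simp only [Bool.false_eq_true, if_false, if_pos hb]
          rw [hdrop2] at ih2
          simp only [pvALoop] at ih2
          obtain ⟨hr, hrest⟩ := by simpa using ih2.symm
          simp [hr, hrest, hdrop2, pvALoop]
      · by_cases hn : text[i] = '\n'
        · obtain ⟨ih1, ih2⟩ := IH (i + 1) (by omega)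
          rcases hrj : pvBInner text (pvMkCloser text) fuel (i + 1) with ⟨r, j⟩
          rw [hrj] at ih1 ih2
          rw [pvBInner]
          simp only [dif_pos hi, if_neg hb, if_pos hn, hrj]
          refine ⟨by simpa using by omega, ?_⟩
          rw [hdrop, pvALoop]
          simp only [Bool.false_eq_true, if_false, if_neg hb, if_pos hn]
          simpa using ih2
        · by_cases hq : text[i] = '"'
          · by_cases hcl : (pvMkCloser text).getD (i + 1) true = true
            · rw [pvBInner]
              simp only [dif_pos hi, if_neg hb, if_neg hn, if_pos hq, if_pos hcl]
              refine ⟨by simp, ?_⟩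
              rw [hdrop, pvALoop]
              simp only [Bool.false_eq_true, if_false, if_neg hb, if_neg hn,
                if_pos hq, htbl, if_pos hcl]
              simp
            · obtain ⟨ih1, ih2⟩ := IH (i + 1) (by omega)
              rcases hrj : pvBInner text (pvMkCloser text) fuel (i + 1) with ⟨r, j⟩
              rw [hrj] at ih1 ih2
              rw [pvBInner]
              simp only [dif_pos hi, if_neg hb, if_neg hn, if_pos hq, if_neg hcl, hrj]
              refine ⟨by simpa using by omega, ?_⟩
              rw [hdrop, pvALoop]
              simp only [Bool.false_eq_true, if_false, if_neg hb, if_neg hn,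
                if_pos hq, htbl, if_neg hcl]
              simpa using ih2
          · obtain ⟨ih1, ih2⟩ := IH (i + 1) (by omega)
            rcases hrj : pvBInner text (pvMkCloser text) fuel (i + 1) with ⟨r, j⟩
            rw [hrj] at ih1 ih2
            rw [pvBInner]
            simp only [dif_pos hi, if_neg hb, if_neg hn, if_neg hq, hrj]
            refine ⟨by simpa using by omega, ?_⟩
            rw [hdrop, pvALoop]
            simp only [Bool.false_eq_true, if_false, if_neg hb, if_neg hn, if_neg hq]
            simpa using ih2
    · have hdrop : text.drop i = [] := List.drop_eq_nil_iff.mpr (by omega)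
      rw [pvBInner]
      simp [dif_neg hi, hdrop, pvALoop]

-- the outer loop equals A outside a string
lemma pvOuter (text : List Char) : ∀ fuel i, text.length ≤ i + fuel →
    pvALoop text i (text.drop i) false false = pvBOuter text (pvMkCloser text) fuel i := by
  intro fuel
  induction fuel with
  | zero =>
    intro i hf
    have hdrop : text.drop i = [] := List.drop_eq_nil_iff.mpr (by omega)
    simp [pvBOuter, hdrop, pvALoop]
  | succ fuel IH =>
    intro i hf
    by_cases hi : i < text.length
    · have hdrop : text.drop i = text[i] :: text.drop (i + 1) := List.drop_eq_getElem_cons hi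
      by_cases hq : text[i] = '"'
      · obtain ⟨ih1, ih2⟩ := pvInner text text.length (i + 1) (by omega)
        rcases hrj : pvBInner text (pvMkCloser text) text.length (i + 1) with ⟨r, j⟩
        rw [hrj] at ih1 ih2
        rw [pvBOuter]
        simp only [dif_pos hi, if_pos hq, hrj]
        rw [hdrop, pvALoop]
        simp only [Bool.false_eq_true, if_false, hq, decide_true]
        simp only at ih1
        rw [show pvALoop text (i + 1) (text.drop (i + 1)) true false
            = r ++ pvALoop text j (text.drop j) false false from by simpa using ih2,
          IH j (by omega)]
      · rw [pvBOuter]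
        simp only [dif_pos hi, if_neg hq]
        rw [hdrop, pvALoop]
        simp only [Bool.false_eq_true, if_false, hq, decide_false]
        rw [IH (i + 1) (by omega)]
    · have hdrop : text.drop i = [] := List.drop_eq_nil_iff.mpr (by omega)
      rw [pvBOuter]
      simp [dif_neg hi, hdrop, pvALoop]

-- ===== VERDICT (by name: the statement is the Claim_ definition above) =====
theorem repair_json_text_py_spec : Claim_equal_repair_json_text_py := by
  intro text _
  show _ = _
  unfold repair_json_text_py repair_json_text_py_alt
  have h := pvOuter text.toList text.toList.length 0 (by omega)
  rw [List.drop_zero] at h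
  rw [h]
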